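-- pv_equiv track=rewrite | github.com/SamanehGhafouri/HavelHakimi-Algorithm | test_hakimi.py | sequence_for_task_four
-- ===== SOURCE A (Python) =====
-- def sequence_for_task_four(n: int, i: int):
--
-- 	result = []
-- 	for val in range(1, n):
-- 		result.append(val)
-- 		if i == val:
-- 			result.append(val)
--
-- 	result.reverse()
-- 	return result
-- ===== SOURCE B (Python) =====
-- def sequence_for_task_four(n: int, i: int):
--     # Simpler: build the reversed list directly, then one conditional insert for the duplicate.
--     result = list(range(n - 1, 0, -1))
--     if 1 <= i < n:
--         result.insert((n - 1) - i, i)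
--     return result
-- ===== Notes on version B (the rewrite author's own statement) =====
-- stated objective: simpler
-- what changed: Replaces the append-loop with a per-element branch plus a reverse() by a direct reversed range constructor and a single conditional insert of the duplicate at its computed position.
import Mathlib
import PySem

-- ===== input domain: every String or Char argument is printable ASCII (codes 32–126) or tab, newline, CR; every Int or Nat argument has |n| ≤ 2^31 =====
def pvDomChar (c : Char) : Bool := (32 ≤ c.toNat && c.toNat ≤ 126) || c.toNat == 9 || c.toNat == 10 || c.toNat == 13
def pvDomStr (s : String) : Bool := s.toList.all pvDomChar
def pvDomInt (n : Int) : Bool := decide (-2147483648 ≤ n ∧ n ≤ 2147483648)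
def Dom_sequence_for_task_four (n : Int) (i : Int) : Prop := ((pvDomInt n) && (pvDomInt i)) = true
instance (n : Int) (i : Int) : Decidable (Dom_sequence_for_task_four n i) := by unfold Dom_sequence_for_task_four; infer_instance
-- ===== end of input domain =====

-- B builds the reversed range directly and inserts the duplicate with a single conditional insert (simpler decomposition; same cost).

-- ===== PORT A =====
def sequence_for_task_four (n : Int) (i : Int) : List Int :=
  let result :=
    (PySem.List.pyRange 1 n 1).foldl
      (fun acc val =>
        let acc := acc ++ [val]
        if i = val then acc ++ [val] else acc)
      []
  result.reverse

-- ===== PORT B =====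
def sequence_for_task_four_alt (n : Int) (i : Int) : List Int :=
  let result := PySem.List.pyRange (n - 1) 0 (-1)
  if 1 ≤ i ∧ i < n then PySem.List.insert result ((n - 1) - i) i else result

-- ===== PRECONDITION & SPEC =====
def Spec_sequence_for_task_four (n : Int) (i : Int) (out : List Int) : Prop := out = sequence_for_task_four_alt n i
instance (n : Int) (i : Int) (out : List Int) : Decidable (Spec_sequence_for_task_four n i out) := by unfold Spec_sequence_for_task_four; infer_instance

-- ===== CLAIM (what is proved, stated in full; the proofs are below) =====
def Claim_equal_sequence_for_task_four : Prop := ∀ (n : Int) (i : Int), Dom_sequence_for_task_four n i → Spec_sequence_for_task_four n i (sequence_for_task_four n i)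

-- ===== LEMMAS AND PROOFS =====

-- A's loop body rewritten as a single append, then turned into a flatMap
theorem seqA_eq_flatMap (n i : Int) :
    sequence_for_task_four n i =
      ((PySem.List.pyRange 1 n 1).flatMap
        (fun v => if i = v then [v, v] else [v])).reverse := by
  unfold sequence_for_task_four
  have h := PySem.List.foldl_congr_mem
    (l := PySem.List.pyRange 1 n 1) (init := ([] : List Int))
    (f := fun acc val => let acc := acc ++ [val]; if i = val then acc ++ [val] else acc)
    (g := fun acc val => acc ++ (if i = val then [val, val] else [val]))
    (by intro acc x _; by_cases hix : i = x <;> simp [hix])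
  simp only [h, PySem.List.foldl_append_eq_flatMap, List.nil_append]

theorem sequence_for_task_four_spec : Claim_equal_sequence_for_task_four := by
  intro n i _
  unfold Spec_sequence_for_task_four sequence_for_task_four_alt
  rw [seqA_eq_flatMap]
  have hrev : PySem.List.pyRange (n - 1) 0 (-1) = (PySem.List.pyRange 1 n 1).reverse := by
    rw [PySem.List.pyRange_neg_one_eq_reverse]; norm_num
  by_cases hin : 1 ≤ i ∧ i < n
  · -- split the range at i
    have h1 := hin.1
    have h2 := hin.2
    have hsplit : PySem.List.pyRange 1 n 1 =
        PySem.List.pyRange 1 i 1 ++ i :: PySem.List.pyRange (i + 1) n 1 := by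
      rw [PySem.List.pyRange_one_append 1 i n h1 (le_of_lt h2),
          PySem.List.pyRange_one_cons h2]
    have hlo : ∀ v ∈ PySem.List.pyRange 1 i 1, (if i = v then [v, v] else [v]) = [v] := by
      intro v hv
      rw [PySem.List.mem_pyRange_one] at hv
      simp [show i ≠ v by omega]
    have hhi : ∀ v ∈ PySem.List.pyRange (i + 1) n 1, (if i = v then [v, v] else [v]) = [v] := by
      intro v hv
      rw [PySem.List.mem_pyRange_one] at hv
      simp [show i ≠ v by omega]
    simp only [if_pos hin, hrev, hsplit]
    rw [List.flatMap_append, List.flatMap_cons,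
        List.flatMap_congr hlo, List.flatMap_congr hhi,
        List.flatMap_singleton', List.flatMap_singleton']
    -- both sides over explicit reverses
    have hlen : ((PySem.List.pyRange (i + 1) n 1).reverse.length : Int) = n - 1 - i := by
      simp [PySem.List.length_pyRange_one]; omega
    have hpos : (n - 1) - i = (((PySem.List.pyRange (i + 1) n 1).reverse.length : Nat) : Int) := by
      omega
    simp only [List.reverse_append, List.reverse_cons, List.append_assoc]
    rw [hpos, PySem.List.insert_natCast _ _ i (by simp)]
    simp
  · have hno : ∀ v ∈ PySem.List.pyRange 1 n 1, (if i = v then [v, v] else [v]) = [v] := by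
      intro v hv
      rw [PySem.List.mem_pyRange_one] at hv
      simp [show i ≠ v by omega]
    simp only [if_neg hin, hrev]
    rw [List.flatMap_congr hno, List.flatMap_singleton']
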